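-- pv_equiv track=rewrite | github.com/amol-ship-it/agi-core | domains/arc/primitives.py | recolor_least_to_2nd_least
-- ===== SOURCE A (Python) =====
-- Grid = list[list[int]]
--
-- def recolor_least_to_2nd_least(grid: Grid) -> Grid:
--     """Replace the least common non-bg color with the 2nd least common."""
--     if not grid or not grid[0]:
--         return grid
--     from collections import Counter
--     flat = [v for row in grid for v in row]
--     counts = Counter(flat)
--     bg = counts.most_common(1)[0][0]
--     non_bg_sorted = [(v, c) for v, c in sorted(counts.items(), key=lambda x: x[1]) if v != bg]
--     if len(non_bg_sorted) < 2:
--         return grid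
--     src, dst = non_bg_sorted[0][0], non_bg_sorted[1][0]
--     return [[dst if v == src else v for v in row] for row in grid]
-- ===== SOURCE B (Python) =====
-- Grid = list[list[int]]
--
-- def recolor_least_to_2nd_least(grid: Grid) -> Grid:
--     """Replace the least common non-bg color with the 2nd least common."""
--     if not grid or not grid[0]:
--         return grid
--     counts = {}
--     for row in grid:
--         for v in row:
--             counts[v] = counts.get(v, 0) + 1
--     colors = list(counts)  # distinct colors in first-appearance order
--     bg = colors[0]
--     for c in colors:
--         if counts[c] > counts[bg]:
--             bg = c
--     src = dst = None  # least / second-least common non-bg color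
--     for c in colors:
--         if c == bg:
--             continue
--         if src is None or counts[c] < counts[src]:
--             src, dst = c, src
--         elif dst is None or counts[c] < counts[dst]:
--             dst = c
--     if dst is None:
--         return grid
--     return [[dst if v == src else v for v in row] for row in grid]
-- ===== Notes on version B (the rewrite author's own statement) =====
-- stated objective: alternative
-- what changed: B replaces Counter plus two full stable sorts of the count items with one dict counting pass and two linear selection folds (strict-max for bg, a two-slot minimum scan for the least and 2nd-least colors) that reproduce the stable sort's first-appearance tie-breaking.
import Mathlib
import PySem

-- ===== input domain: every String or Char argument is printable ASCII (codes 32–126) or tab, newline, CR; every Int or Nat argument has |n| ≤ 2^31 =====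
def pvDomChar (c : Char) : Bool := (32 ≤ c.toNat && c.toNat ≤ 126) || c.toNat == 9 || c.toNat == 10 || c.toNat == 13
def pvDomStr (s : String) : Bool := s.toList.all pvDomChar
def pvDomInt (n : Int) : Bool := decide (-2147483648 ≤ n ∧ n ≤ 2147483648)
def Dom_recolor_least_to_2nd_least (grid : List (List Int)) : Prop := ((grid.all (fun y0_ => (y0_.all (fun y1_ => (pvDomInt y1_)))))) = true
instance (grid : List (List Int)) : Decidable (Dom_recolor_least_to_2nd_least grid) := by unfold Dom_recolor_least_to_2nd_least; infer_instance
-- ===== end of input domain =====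

-- B replaces A's full stable sorts of the color counts by one counting pass plus two
-- selection folds (max for bg, two smallest for src/dst) with the same stable tie-breaking.

-- ===== PORT A =====
-- Counter(flat) is PySem.Dict.counter; counts.most_common(1)[0][0] is the first item of the
-- stable count-descending order (heapq.nlargest(1) ≡ sorted(..., reverse=True)[:1]); the
-- pyGetD defaults are never used (the guards ensure the indices are in range).
def recolor_least_to_2nd_least (grid : List (List Int)) : List (List Int) :=
  match grid with
  | [] => grid
  | r0 :: _ =>
    if r0 = [] then grid
    else
      let flat := grid.flatMap (fun row => row)
      let counts := PySem.Dict.counter flat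
      let bg := (PySem.List.pyGetD (PySem.List.sorted counts.items (fun p => p.2) true) 0 (0, 0)).1
      let non_bg_sorted := (PySem.List.sorted counts.items (fun p => p.2) false).filter
        (fun p => decide (p.1 ≠ bg))
      if non_bg_sorted.length < 2 then grid
      else
        let src := (PySem.List.pyGetD non_bg_sorted 0 (0, 0)).1
        let dst := (PySem.List.pyGetD non_bg_sorted 1 (0, 0)).1
        grid.map (fun row => row.map (fun v => if v = src then dst else v))

-- ===== PORT B =====
def recolor_least_to_2nd_least_alt (grid : List (List Int)) : List (List Int) :=
  match grid with
  | [] => grid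
  | r0 :: _ =>
    if r0 = [] then grid
    else
      let counts := grid.foldl
        (fun d row => row.foldl (fun (d : PySem.Dict Int Int) v => d.insert v (d.getD v 0 + 1)) d)
        PySem.Dict.empty
      let colors := counts.keys
      let bg := colors.foldl (fun bg c => if counts.getD bg 0 < counts.getD c 0 then c else bg)
        (colors.headD 0)
      let sd := colors.foldl (fun (sd : Option Int × Option Int) c =>
          if c = bg then sd
          -- 'if src is None or counts[c] < counts[src]: src, dst = c, src'
          -- (the .getD 0 only extracts the value; the isNone guard ensures it is present)
          else if sd.1.isNone || decide (counts.getD c 0 < counts.getD (sd.1.getD 0) 0) then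
            (some c, sd.1)
          -- 'elif dst is None or counts[c] < counts[dst]: dst = c'
          else if sd.2.isNone || decide (counts.getD c 0 < counts.getD (sd.2.getD 0) 0) then
            (sd.1, some c)
          else sd) (none, none)
      -- 'if dst is None: return grid' and the final remap (src is present whenever dst is)
      if sd.2 = none then grid
      else grid.map (fun row => row.map (fun v => if v = sd.1.getD 0 then sd.2.getD 0 else v))

-- ===== PRECONDITION & SPEC =====
def Spec_recolor_least_to_2nd_least (grid : List (List Int)) (out : List (List Int)) : Prop := out = recolor_least_to_2nd_least_alt grid
instance (grid : List (List Int)) (out : List (List Int)) : Decidable (Spec_recolor_least_to_2nd_least grid out) := by unfold Spec_recolor_least_to_2nd_least; infer_instance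

-- ===== CLAIM (what is proved, stated in full; the proofs are below) =====
def Claim_equal_recolor_least_to_2nd_least : Prop := ∀ (grid : List (List Int)), Dom_recolor_least_to_2nd_least grid → Spec_recolor_least_to_2nd_least grid (recolor_least_to_2nd_least grid)

-- ===== LEMMAS AND PROOFS =====

-- the two-smallest selection step of B, generic in the key
def pvStep2 {α : Type} (key : α → Int) (sd : Option α × Option α) (c : α) : Option α × Option α :=
  match sd with
  | (none, _) => (some c, none)
  | (some sv, none) => if key c < key sv then (some c, some sv) else (some sv, some c)
  | (some sv, some dv) =>
      if key c < key sv then (some c, some sv)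
      else if key c < key dv then (some sv, some c)
      else (some sv, some dv)

-- inserting one element into a list changes its first two entries exactly as pvStep2 does
theorem pvInsert_head2 {α : Type} (key : α → Int) (y : α) (acc : List α) :
    ((PySem.List.insertBy (fun a b => decide (key a < key b)) y acc).head?,
     (PySem.List.insertBy (fun a b => decide (key a < key b)) y acc)[1]?) =
    pvStep2 key (acc.head?, acc[1]?) y := by
  match acc with
  | [] => simp [PySem.List.insertBy, pvStep2]
  | [a] =>
    simp only [PySem.List.insertBy, pvStep2]
    split_ifs <;> simp_all
  | a :: b :: t =>
    simp only [PySem.List.insertBy, pvStep2]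
    split_ifs <;> simp_all
    split_ifs <;> simp_all <;> omega

-- the first two entries of the insertion-sort fold are computed by folding pvStep2
theorem pvFold_head2 {α : Type} (key : α → Int) (l : List α) :
    ∀ (acc : List α), l.foldl (pvStep2 key) (acc.head?, acc[1]?) =
    ((l.foldl (fun acc x => PySem.List.insertBy (fun a b => decide (key a < key b)) x acc) acc).head?,
     (l.foldl (fun acc x => PySem.List.insertBy (fun a b => decide (key a < key b)) x acc) acc)[1]?) := by
  induction l with
  | nil => intro acc; simp
  | cons y t ih =>
    intro acc
    simp only [List.foldl_cons]
    rw [← pvInsert_head2 key y acc, ih]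

-- head of one reverse-mode insertion is the strict-max step
theorem pvInsertRev_head {α : Type} (key : α → Int) (y a : α) (acc : List α)
    (h : acc.head? = some a) :
    (PySem.List.insertBy (fun a b => decide (key b < key a)) y acc).head? =
    some (if key a < key y then y else a) := by
  match acc with
  | b :: t =>
    simp only [List.head?_cons, Option.some_inj] at h
    subst h
    simp only [PySem.List.insertBy]
    split_ifs <;> simp_all

-- head of the reverse insertion-sort fold is the running strict max (first max wins ties)
theorem pvFoldRev_head {α : Type} (key : α → Int) (l : List α) :
    ∀ (acc : List α) (a : α), acc.head? = some a →
    (l.foldl (fun acc x => PySem.List.insertBy (fun a b => decide (key b < key a)) x acc) acc).head? =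
    some (l.foldl (fun b c => if key b < key c then c else b) a) := by
  induction l with
  | nil => intro acc a h; simpa using h
  | cons y t ih =>
    intro acc a h
    simp only [List.foldl_cons]
    exact ih _ _ (pvInsertRev_head key y a acc h)

-- filtering away the inserted element leaves the filtered list unchanged
theorem pvFilter_insert_neg {α : Type} (p : α → Bool) (bef : α → α → Bool) (x : α) (S : List α)
    (hx : p x = false) :
    (PySem.List.insertBy bef x S).filter p = S.filter p := by
  induction S with
  | nil => simp [PySem.List.insertBy, hx]
  | cons a t ih =>
    simp only [PySem.List.insertBy]
    split_ifs with h
    · simp [hx]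
    · simp [List.filter_cons, ih]

-- on a key-sorted list, filtering commutes with one ascending insertion of a kept element
theorem pvFilter_insert_pos {α : Type} (key : α → Int) (p : α → Bool) (x : α) (S : List α)
    (hS : S.Pairwise (fun a b => key a ≤ key b)) (hx : p x = true) :
    (PySem.List.insertBy (fun a b => decide (key a < key b)) x S).filter p =
    PySem.List.insertBy (fun a b => decide (key a < key b)) x (S.filter p) := by
  induction S with
  | nil => simp [PySem.List.insertBy, hx]
  | cons a t ih =>
    rw [List.pairwise_cons] at hS
    obtain ⟨ha, ht⟩ := hS
    simp only [PySem.List.insertBy]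
    split_ifs with h
    · -- key x < key a : x goes in front; every kept element has key ≥ key a > key x
      simp only [decide_eq_true_eq] at h
      rw [List.filter_cons_of_pos hx]
      -- show insertBy x (filter p (a :: t)) = x :: filter p (a :: t)
      cases hft : (a :: t).filter p with
      | nil => simp [PySem.List.insertBy]
      | cons b m =>
        have hb : b ∈ (a :: t).filter p := by rw [hft]; exact List.mem_cons_self
        have hb' : b ∈ a :: t := List.mem_of_mem_filter hb
        have hkb : key a ≤ key b := by
          rcases List.mem_cons.mp hb' with rfl | hbt
          · exact le_refl _
          · exact ha b hbt
        simp [PySem.List.insertBy, show key x < key b from lt_of_lt_of_le h hkb]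
    · by_cases hpa : p a = true
      · rw [List.filter_cons_of_pos hpa, List.filter_cons_of_pos hpa,
          PySem.List.insertBy]
        rw [if_neg h]
        rw [ih ht]
      · rw [List.filter_cons_of_neg (by simpa using hpa), List.filter_cons_of_neg (by simpa using hpa)]
        exact ih ht

-- filter commutes with the stable ascending sort
theorem pvSorted_filter {α : Type} (key : α → Int) (p : α → Bool) (l : List α) :
    (PySem.List.sorted l key false).filter p = PySem.List.sorted (l.filter p) key false := by
  induction l using List.reverseRecOn with
  | nil => simp [PySem.List.sorted]
  | append_singleton t x ih =>
    rw [PySem.List.sorted_eq_foldl_insertBy, PySem.List.sorted_eq_foldl_insertBy,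
      List.filter_append, List.foldl_append, List.foldl_append]
    simp only [List.foldl_cons, List.foldl_nil]
    rw [← PySem.List.sorted_eq_foldl_insertBy]
    by_cases hx : p x = true
    · rw [pvFilter_insert_pos key p x _ (PySem.List.sorted_pairwise t key) hx, ih,
        List.filter_cons_of_pos hx, List.filter_nil, List.foldl_cons, List.foldl_nil,
        ← PySem.List.sorted_eq_foldl_insertBy]
    · rw [pvFilter_insert_neg p _ x _ (by simpa using hx), ih,
        List.filter_cons_of_neg (by simpa using hx), List.filter_nil, List.foldl_nil,
        ← PySem.List.sorted_eq_foldl_insertBy]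

-- first item of the count-descending stable sort of (k, cnt k) pairs = strict-max fold over the keys
theorem pvBgA {α : Type} (cnt : α → Int) (k0 : α) (kt : List α) (d : α × Int) :
    PySem.List.pyGetD (PySem.List.sorted ((k0 :: kt).map (fun k => (k, cnt k))) (fun p => p.2) true) 0 d =
    (kt.foldl (fun b c => if cnt b < cnt c then c else b) k0,
     cnt (kt.foldl (fun b c => if cnt b < cnt c then c else b) k0)) := by
  rw [PySem.List.sorted_rev_eq_foldl_insertBy]
  simp only [List.map_cons, List.foldl_cons]
  have h0 : PySem.List.insertBy (fun a b => decide ((fun p : α × Int => p.2) b < (fun p : α × Int => p.2) a)) (k0, cnt k0) [] = [(k0, cnt k0)] := by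
    simp [PySem.List.insertBy]
  rw [h0]
  have hh := pvFoldRev_head (fun p : α × Int => p.2) (kt.map (fun k => (k, cnt k))) [(k0, cnt k0)] (k0, cnt k0) rfl
  have hhom : List.foldl (fun (b c : α × Int) => if (fun p : α × Int => p.2) b < (fun p : α × Int => p.2) c then c else b) (k0, cnt k0) (kt.map (fun k => (k, cnt k))) = ((kt.foldl (fun b c => if cnt b < cnt c then c else b) k0), cnt (kt.foldl (fun b c => if cnt b < cnt c then c else b) k0)) := by
    rw [List.foldl_map]
    exact List.foldl_hom (f := fun k => (k, cnt k)) (fun x y => by by_cases h : cnt x < cnt y <;> simp [h])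
  simp only at hh hhom
  rw [hhom] at hh
  obtain ⟨rest, hrest⟩ := List.head?_eq_some_iff.mp hh
  rw [hrest]
  simp [PySem.List.pyGetD_of_nonneg]

-- first two items of the count-ascending stable sort of (k, cnt k) pairs = pvStep2-fold over the keys
theorem pvSelA {α : Type} (cnt : α → Int) (ksF : List α) :
    ((PySem.List.sorted (ksF.map (fun k => (k, cnt k))) (fun p => p.2) false).head?,
     (PySem.List.sorted (ksF.map (fun k => (k, cnt k))) (fun p => p.2) false)[1]?) =
    ((ksF.foldl (pvStep2 cnt) (none, none)).1.map (fun k => (k, cnt k)),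
     (ksF.foldl (pvStep2 cnt) (none, none)).2.map (fun k => (k, cnt k))) := by
  rw [PySem.List.sorted_eq_foldl_insertBy]
  rw [← pvFold_head2 (fun p : α × Int => p.2) (ksF.map fun k => (k, cnt k)) []]
  simp only [List.head?_nil, List.getElem?_nil]
  rw [List.foldl_map]
  have := List.foldl_hom
    (f := fun sd : Option α × Option α => (sd.1.map (fun k => (k, cnt k)), sd.2.map (fun k => (k, cnt k))))
    (g₁ := pvStep2 cnt)
    (g₂ := fun sd c => pvStep2 (fun p : α × Int => p.2) sd ((fun k => (k, cnt k)) c))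
    (init := (none, none)) (l := ksF)
    (fun x y => by rcases x with ⟨_|sv, _|dv⟩ <;> simp only [pvStep2, Option.map_some, Option.map_none] <;> split_ifs <;> rfl)
  simpa using this

-- ===== VERDICT (by name: the statement is the Claim_ definition above) =====
theorem recolor_least_to_2nd_least_spec : Claim_equal_recolor_least_to_2nd_least := by
  intro grid _
  unfold Spec_recolor_least_to_2nd_least
  match grid with
  | [] => rfl
  | r0 :: g =>
    by_cases hr0 : r0 = []
    · simp only [recolor_least_to_2nd_least, recolor_least_to_2nd_least_alt, if_pos hr0]
    · simp only [recolor_least_to_2nd_least, recolor_least_to_2nd_least_alt, if_neg hr0]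
      -- B's nested counting loop builds Counter(flat)
      have hc : (r0 :: g).foldl
          (fun d row => row.foldl (fun (d : PySem.Dict Int Int) v => d.insert v (d.getD v 0 + 1)) d)
          PySem.Dict.empty = PySem.Dict.counter (List.flatMap (fun row => row) (r0 :: g)) := by
        rw [← PySem.Dict.foldl_insert_getD_add_one_eq_counter, List.flatMap_id', List.foldl_flatten]
      rw [hc]
      simp only [PySem.Dict.keys_counter, PySem.Dict.getD_counter, PySem.Dict.items_counter]
      -- the distinct colors are nonempty
      obtain ⟨v, vs, rfl⟩ : ∃ v vs, r0 = v :: vs := by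
        cases r0 with
        | nil => exact absurd rfl hr0
        | cons v vs => exact ⟨v, vs, rfl⟩
      have hvmem : v ∈ PySem.Set.ofList (List.flatMap (fun row => row) ((v :: vs) :: g)) := by
        rw [PySem.Set.mem_ofList]
        simp
      obtain ⟨k0, kt, hks⟩ : ∃ k0 kt,
          PySem.Set.ofList (List.flatMap (fun row => row) ((v :: vs) :: g)) = k0 :: kt := by
        cases h : PySem.Set.ofList (List.flatMap (fun row => row) ((v :: vs) :: g)) with
        | nil => rw [h] at hvmem; cases hvmem
        | cons a t => exact ⟨a, t, rfl⟩
      rw [hks]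
      -- A's most_common(1) head and B's max fold agree: both are bgv
      rw [pvBgA]
      set Flat := List.flatMap (fun row => row) ((v :: vs) :: g) with hFlat
      set bgv := kt.foldl (fun b c =>
        if (↑(List.count b Flat) : Int) < ↑(List.count c Flat) then c else b) k0 with hbgv
      have hbgB : List.foldl (fun bg c =>
          if (↑(List.count bg Flat) : Int) < ↑(List.count c Flat) then c else bg)
          ((k0 :: kt).headD 0) (k0 :: kt) = bgv := by
        rw [hbgv]
        simp only [List.headD_cons, List.foldl_cons, ite_self]
      rw [hbgB]
      -- A's sort-then-filter = sort of filtered pairs over filtered colors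
      rw [pvSorted_filter, List.filter_map]
      have hcomp : ((fun p : Int × Int => decide (p.1 ≠ bgv)) ∘ (fun k => (k, (↑(List.count k Flat) : Int))))
          = (fun c => decide (c ≠ bgv)) := rfl
      rw [hcomp]
      -- B's selection fold = pvStep2 fold over the filtered colors
      have hsdf : (fun (sd : Option Int × Option Int) c =>
            if c = bgv then sd
            else
              if (sd.1.isNone || decide ((↑(List.count c Flat) : Int) < ↑(List.count (sd.1.getD 0) Flat))) = true then
                (some c, sd.1)
              else
                if (sd.2.isNone || decide ((↑(List.count c Flat) : Int) < ↑(List.count (sd.2.getD 0) Flat))) = true then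
                  (sd.1, some c)
                else sd)
          = (fun (sd : Option Int × Option Int) c =>
              if decide (c ≠ bgv) = true then pvStep2 (fun k => (↑(List.count k Flat) : Int)) sd c else sd) := by
        funext sd c
        by_cases hc : c = bgv
        · simp [hc]
        · rcases sd with ⟨_ | sv, _ | dv⟩ <;>
            simp [pvStep2, hc]
      rw [hsdf, ← List.foldl_filter]
      have hsel := pvSelA (fun k => (↑(List.count k Flat) : Int))
        ((k0 :: kt).filter (fun c => decide (c ≠ bgv)))
      generalize hq : List.foldl (pvStep2 (fun k => (↑(List.count k Flat) : Int))) (none, none)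
        ((k0 :: kt).filter (fun c => decide (c ≠ bgv))) = q at hsel ⊢
      obtain ⟨qs, qd⟩ := q
      simp only [Prod.mk.injEq] at hsel
      obtain ⟨hsel1, hsel2⟩ := hsel
      match qd with
      | none =>
        rw [if_pos rfl]
        rw [if_pos ?_]
        simp only [Option.map_none, List.getElem?_eq_none_iff] at hsel2
        omega
      | some dst =>
        match qs with
        | none =>
          simp only [Option.map_none, List.head?_eq_none_iff] at hsel1
          rw [hsel1] at hsel2
          simp at hsel2
        | some src =>
          simp only [Option.map_some] at hsel1 hsel2
          obtain ⟨t1, ht1⟩ := List.head?_eq_some_iff.mp hsel1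
          rw [ht1] at hsel2
          have h2 : t1.head? = some (dst, (↑(List.count dst Flat) : Int)) := by
            rw [List.head?_eq_getElem?]
            simpa using hsel2
          obtain ⟨t2, ht2⟩ := List.head?_eq_some_iff.mp h2
          rw [ht2] at ht1
          rw [ht1]
          rw [if_neg (by simp), if_neg (by simp)]
          simp [PySem.List.pyGetD_of_nonneg, List.getD]
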